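-- pv_equiv track=rewrite | github.com/Druidae/Codility | challenges/pi_code_challenge/solution.py | solution
-- ===== SOURCE A (Python) =====
-- def solution(P, Q):
--     seen = set()
--     distinct_letters = 0
--     for i in range(len(P)):
--         if P[i] not in seen and Q[i] not in seen:
--             distinct_letters += 1
--         seen.add(P[i])
--         seen.add(Q[i])
--     return distinct_letters
-- ===== SOURCE B (Python) =====
-- def solution(P, Q):
--     firstpos = {}
--     for i in range(len(P)):
--         firstpos.setdefault(P[i], i)
--         firstpos.setdefault(Q[i], i)
--     count = 0
--     for i in range(len(P)):
--         if firstpos[P[i]] == i and firstpos[Q[i]] == i: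
--             count += 1
--     return count
-- ===== Notes on version B (the rewrite author's own statement) =====
-- stated objective: alternative
-- what changed: Replaces the single pass that mutates a growing seen-set while counting with two independent passes: one builds a dict mapping each letter to its earliest index in P or Q (setdefault), then a pure lookup pass counts positions i where both letters' first index equals i.
import Mathlib
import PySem

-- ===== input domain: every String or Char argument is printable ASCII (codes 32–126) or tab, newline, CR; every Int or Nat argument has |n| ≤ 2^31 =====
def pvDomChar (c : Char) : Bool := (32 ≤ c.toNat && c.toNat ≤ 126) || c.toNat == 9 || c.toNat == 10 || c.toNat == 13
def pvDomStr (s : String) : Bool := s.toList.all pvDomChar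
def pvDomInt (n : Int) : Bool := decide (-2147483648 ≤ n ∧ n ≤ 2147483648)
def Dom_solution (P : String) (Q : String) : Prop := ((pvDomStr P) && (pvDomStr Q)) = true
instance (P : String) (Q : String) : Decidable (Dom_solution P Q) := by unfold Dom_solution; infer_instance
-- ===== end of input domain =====

-- B replaces A's count-while-mutating-a-seen-set pass by a first-occurrence-index dict built in
-- one pass and consulted in a second, non-mutating counting pass (alternative decomposition, same cost).

-- ===== PORT A =====
def solution (P : String) (Q : String) : Int :=
  ((PySem.List.pyRange 0 (PySem.Str.len P) 1).foldl
    (fun (st : PySem.Set Char × Int) i =>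
      let c := PySem.List.pyGetD P.toList i ' '
      let d := PySem.List.pyGetD Q.toList i ' '
      let cnt := if PySem.Set.contains st.1 c = false ∧ PySem.Set.contains st.1 d = false
                 then st.2 + 1 else st.2
      (PySem.Set.add (PySem.Set.add st.1 c) d, cnt))
    (PySem.Set.empty, 0)).2

-- ===== PORT B =====
def solution_alt (P : String) (Q : String) : Int :=
  let fp := (PySem.List.pyRange 0 (PySem.Str.len P) 1).foldl
    (fun (d : PySem.Dict Char Int) i =>
      (d.setdefault (PySem.List.pyGetD P.toList i ' ') i).setdefault
        (PySem.List.pyGetD Q.toList i ' ') i)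
    PySem.Dict.empty
  (PySem.List.pyRange 0 (PySem.Str.len P) 1).foldl
    (fun (cnt : Int) i =>
      if fp.getD (PySem.List.pyGetD P.toList i ' ') 0 = i ∧
         fp.getD (PySem.List.pyGetD Q.toList i ' ') 0 = i
      then cnt + 1 else cnt)
    0

-- ===== PRECONDITION & SPEC =====
-- Pre_ excludes exactly the inputs with len(Q) < len(P), on which both Pythons raise IndexError at Q[i].
def Pre_solution (P : String) (Q : String) : Prop := P.toList.length ≤ Q.toList.length
instance (P : String) (Q : String) : Decidable (Pre_solution P Q) := by unfold Pre_solution; infer_instance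
def pvWitness_solution : String × String := ("abca", "bbaa")

def Spec_solution (P : String) (Q : String) (out : Int) : Prop := out = solution_alt P Q
instance (P : String) (Q : String) (out : Int) : Decidable (Spec_solution P Q out) := by unfold Spec_solution; infer_instance

-- ===== CLAIM (what is proved, stated in full; the proofs are below) =====
def Claim_equal_solution : Prop := ∀ (P : String) (Q : String), Dom_solution P Q → Pre_solution P Q → Spec_solution P Q (solution P Q)

-- ===== LEMMAS AND PROOFS =====

-- character at index i, with the (never-observed inside Pre_) default both ports use
def pvG (xs : List Char) (i : Nat) : Char := xs.getD i ' '

lemma pvG_eq (xs : List Char) (i : Nat) : xs.getD i ' ' = pvG xs i := rfl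

-- the letters seen by A after m steps, in A's insertion order
def pvMix (p q : List Char) : Nat → List Char
  | 0 => []
  | m + 1 => pvMix p q m ++ [pvG p m, pvG q m]

-- A's count after m steps
def pvCnt (p q : List Char) : Nat → Int
  | 0 => 0
  | m + 1 => if pvG p m ∉ pvMix p q m ∧ pvG q m ∉ pvMix p q m
             then pvCnt p q m + 1 else pvCnt p q m

-- first index (< m) at which a letter occurs in p or q, as B's dict stores it
def pvFirst (p q : List Char) : Nat → Char → Option Int
  | 0, _ => none
  | m + 1, c =>
    match pvFirst p q m c with
    | some j => some j
    | none => if c = pvG p m ∨ c = pvG q m then some (m : Int) else none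

lemma pvMix_mono (p q : List Char) {m m' : Nat} (h : m ≤ m') {c : Char}
    (hc : c ∈ pvMix p q m) : c ∈ pvMix p q m' := by
  induction m', h using Nat.le_induction with
  | base => exact hc
  | succ k hk ih =>
    simp only [pvMix, List.mem_append]
    exact Or.inl ih

lemma pvFirst_none_iff (p q : List Char) (m : Nat) (c : Char) :
    pvFirst p q m c = none ↔ c ∉ pvMix p q m := by
  induction m with
  | zero => simp [pvFirst, pvMix]
  | succ m ih =>
    simp only [pvFirst]
    cases h : pvFirst p q m c with
    | some j =>
      rw [h] at ih
      have hc : c ∈ pvMix p q m := by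
        by_contra hcn
        simpa using ih.mpr hcn
      simp [pvMix, hc]
    | none =>
      rw [h] at ih
      by_cases hc : c = pvG p m ∨ c = pvG q m
      · rcases hc with h1 | h1 <;> rw [h1] <;> simp [pvMix]
      · have hnm := ih.mp rfl
        push Not at hc
        simp [pvMix, hnm, hc.1, hc.2]

lemma pvFirst_lt (p q : List Char) (m : Nat) (c : Char) :
    ∀ {j : Int}, pvFirst p q m c = some j → 0 ≤ j ∧ j < (m : Int) := by
  induction m with
  | zero => intro j h; simp [pvFirst] at h
  | succ m ih =>
    intro j h
    simp only [pvFirst] at h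
    cases hm : pvFirst p q m c with
    | some j' =>
      rw [hm] at h
      simp at h
      obtain ⟨h1, h2⟩ := ih hm
      subst h
      constructor <;> omega
    | none =>
      rw [hm] at h
      by_cases hc : c = pvG p m ∨ c = pvG q m
      · simp [hc] at h; subst h; constructor <;> omega
      · simp [hc] at h

lemma pvFirst_mono (p q : List Char) {m m' : Nat} (h : m ≤ m') {c : Char} {j : Int}
    (hj : pvFirst p q m c = some j) : pvFirst p q m' c = some j := by
  induction m', h using Nat.le_induction with
  | base => exact hj
  | succ k hk ih => simp [pvFirst, ih]

lemma pvFirst_eq_iff (p q : List Char) {n i : Nat} (hin : i < n) {c : Char}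
    (hc : c = pvG p i ∨ c = pvG q i) :
    pvFirst p q n c = some (i : Int) ↔ c ∉ pvMix p q i := by
  constructor
  · intro h hmem
    have hne : pvFirst p q i c ≠ none :=
      fun hn => (pvFirst_none_iff p q i c).mp hn hmem
    cases hj : pvFirst p q i c with
    | none => exact hne hj
    | some j =>
      have hj' := pvFirst_mono p q (Nat.le_of_lt hin) hj
      rw [hj'] at h
      obtain ⟨_, hlt⟩ := pvFirst_lt p q i c hj
      simp at h
      omega
  · intro hmem
    have h0 : pvFirst p q i c = none := (pvFirst_none_iff p q i c).mpr hmem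
    have h1 : pvFirst p q (i + 1) c = some (i : Int) := by
      simp [pvFirst, h0, hc]
    exact pvFirst_mono p q hin h1

-- B's dict after m steps computes pvFirst
lemma pvDict_inv (p q : List Char) (m : Nat) (c : Char) :
    ((List.range m).foldl
      (fun (d : PySem.Dict Char Int) k =>
        (d.setdefault (pvG p k) (k : Int)).setdefault (pvG q k) (k : Int))
      PySem.Dict.empty).get? c = pvFirst p q m c := by
  induction m generalizing c with
  | zero => rfl
  | succ m ih =>
    rw [List.range_succ, List.foldl_append]
    simp only [List.foldl_cons, List.foldl_nil]
    set d := (List.range m).foldl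
      (fun (d : PySem.Dict Char Int) k =>
        (d.setdefault (pvG p k) (k : Int)).setdefault (pvG q k) (k : Int))
      PySem.Dict.empty with hd
    by_cases hb : c = pvG q m
    · subst hb
      rw [PySem.Dict.get?_setdefault_self]
      by_cases ha : pvG q m = pvG p m
      · rw [ha, PySem.Dict.get?_setdefault_self, ih]
        simp only [pvFirst, ← ha]
        cases hj : pvFirst p q m (pvG q m) <;> simp
      · rw [PySem.Dict.get?_setdefault_of_ne d _ ha, ih]
        simp only [pvFirst]
        cases hj : pvFirst p q m (pvG q m) <;> simp
    · rw [PySem.Dict.get?_setdefault_of_ne _ _ hb]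
      by_cases ha : c = pvG p m
      · rw [ha, PySem.Dict.get?_setdefault_self, ih]
        simp only [pvFirst]
        cases hj : pvFirst p q m (pvG p m) <;> simp
      · rw [PySem.Dict.get?_setdefault_of_ne _ _ ha, ih]
        simp only [pvFirst]
        cases hj : pvFirst p q m c <;> simp [ha, hb]

-- A's fold after m steps: seen set and count
lemma pvA_inv (p q : List Char) (m : Nat) :
    (List.range m).foldl
      (fun (st : PySem.Set Char × Int) k =>
        (PySem.Set.add (PySem.Set.add st.1 (pvG p k)) (pvG q k),
          if PySem.Set.contains st.1 (pvG p k) = false ∧ PySem.Set.contains st.1 (pvG q k) = false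
          then st.2 + 1 else st.2))
      (PySem.Set.empty, 0)
    = (PySem.Set.ofList (pvMix p q m), pvCnt p q m) := by
  induction m with
  | zero => rfl
  | succ m ih =>
    rw [List.range_succ, List.foldl_append, ih]
    simp only [List.foldl_cons, List.foldl_nil]
    have hc1 : ∀ x : Char,
        (PySem.Set.contains (PySem.Set.ofList (pvMix p q m)) x = false) ↔ x ∉ pvMix p q m := by
      intro x
      rw [← PySem.Set.mem_ofList (pvMix p q m) x, ← PySem.Set.contains_iff]
      cases PySem.Set.contains (PySem.Set.ofList (pvMix p q m)) x <;> simp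
    have hset : PySem.Set.ofList (pvMix p q (m + 1)) =
        PySem.Set.add (PySem.Set.add (PySem.Set.ofList (pvMix p q m)) (pvG p m)) (pvG q m) := by
      show PySem.Set.ofList (pvMix p q m ++ [pvG p m, pvG q m]) = _
      rw [show pvMix p q m ++ [pvG p m, pvG q m] = (pvMix p q m ++ [pvG p m]) ++ [pvG q m] by simp,
          PySem.Set.ofList_append_singleton, PySem.Set.ofList_append_singleton]
    rw [hset]
    simp only [pvCnt]
    congr 1
    rw [if_congr (and_congr (hc1 (pvG p m)) (hc1 (pvG q m))) rfl rfl]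

-- B's counting fold equals A's count, given the dict's characterization
lemma pvB_cnt (p q : List Char) (n : Nat) (fp : PySem.Dict Char Int)
    (hfp : ∀ c, fp.get? c = pvFirst p q n c) :
    ∀ m, m ≤ n →
    (List.range m).foldl
      (fun (cnt : Int) k =>
        if fp.getD (pvG p k) 0 = (k : Int) ∧ fp.getD (pvG q k) 0 = (k : Int)
        then cnt + 1 else cnt)
      0 = pvCnt p q m := by
  intro m
  induction m with
  | zero => intro _; rfl
  | succ m ih =>
    intro hm
    have hmn : m < n := hm
    rw [List.range_succ, List.foldl_append, ih (Nat.le_of_lt hmn)]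
    simp only [List.foldl_cons, List.foldl_nil, pvCnt]
    have hkey : ∀ c : Char, (c = pvG p m ∨ c = pvG q m) →
        (fp.getD c 0 = (m : Int) ↔ c ∉ pvMix p q m) := by
      intro c hc
      rw [← pvFirst_eq_iff p q hmn hc]
      have hmem : c ∈ pvMix p q (m + 1) := by
        rcases hc with h | h <;> subst h <;> simp [pvMix]
      have hmem' : c ∈ pvMix p q n := pvMix_mono p q hmn hmem
      cases hj : pvFirst p q n c with
      | none => exact absurd ((pvFirst_none_iff p q n c).mp hj) (by simp [hmem'])
      | some j =>
        simp only [PySem.Dict.getD, hfp c, hj, Option.getD_some]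
        simp
    rw [if_congr (and_congr (hkey (pvG p m) (Or.inl rfl)) (hkey (pvG q m) (Or.inr rfl))) rfl rfl]

-- ===== VERDICT (by name: the statement is the Claim_ definition above) =====
theorem solution_spec : Claim_equal_solution := by
  intro P Q _ _
  unfold Spec_solution solution solution_alt
  rw [PySem.Str.len_eq, PySem.List.pyRange_zero_nat]
  simp only [List.foldl_map, PySem.List.pyGetD_natCast, pvG_eq]
  rw [pvA_inv P.toList Q.toList P.toList.length]
  rw [pvB_cnt P.toList Q.toList P.toList.length _
      (fun c => pvDict_inv P.toList Q.toList P.toList.length c)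
      P.toList.length (Nat.le_refl _)]
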